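-- pv_equiv track=rewrite | github.com/devalees/backend | Apps/communication/rich_text.py | _format_blockquotes
-- ===== SOURCE A (Python) =====
-- def _format_blockquotes(content: str) -> str:
--     """Format multi-line blockquotes"""
--     lines = content.split('\n')
--     in_blockquote = False
--     result = []
--
--     for line in lines:
--         if line.startswith('> '):
--             if not in_blockquote:
--                 result.append('<blockquote>')
--                 in_blockquote = True
--             result.append(line[2:])
--         else:
--             if in_blockquote:
--                 result.append('</blockquote>')
--                 in_blockquote = False
--             result.append(line)
--
--     if in_blockquote:
--         result.append('</blockquote>')
--
--     return '\n'.join(result)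
-- ===== SOURCE B (Python) =====
-- def _format_blockquotes(content: str) -> str:
--     """Format multi-line blockquotes"""
--     lines = content.split('\n')
--     out = []
--     i = 0
--     n = len(lines)
--     while i < n:
--         if lines[i].startswith('> '):
--             out.append('<blockquote>')
--             while i < n and lines[i].startswith('> '):
--                 out.append(lines[i][2:])
--                 i += 1
--             out.append('</blockquote>')
--         else:
--             out.append(lines[i])
--             i += 1
--     return '\n'.join(out)
-- ===== Notes on version B (the rewrite author's own statement) =====
-- stated objective: alternative
-- what changed: Replaces A's single pass with a per-line in_blockquote flag that is toggled and checked at every line by an explicit run-based grouping pass: an outer loop over runs with an inner loop that consumes a whole consecutive run of quote-prefixed lines, emitting the opening tag, the stripped run, and the closing tag together.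
import Mathlib
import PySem

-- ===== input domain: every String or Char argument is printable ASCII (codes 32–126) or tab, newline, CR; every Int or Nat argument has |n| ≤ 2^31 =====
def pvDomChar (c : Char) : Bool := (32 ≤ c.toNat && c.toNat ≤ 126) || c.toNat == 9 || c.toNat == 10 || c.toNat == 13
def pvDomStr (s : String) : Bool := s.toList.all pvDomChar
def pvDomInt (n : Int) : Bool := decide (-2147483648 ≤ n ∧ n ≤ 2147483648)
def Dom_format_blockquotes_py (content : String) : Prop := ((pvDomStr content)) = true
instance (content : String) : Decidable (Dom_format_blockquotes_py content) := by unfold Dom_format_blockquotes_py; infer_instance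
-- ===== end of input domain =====

-- B replaces A's per-line in_blockquote flag with an explicit run-based pass
-- (outer loop over runs, inner loop consuming a whole '> ' run); objective: alternative.

-- ===== PORT A =====
-- literal transliteration of A: one foldl over the lines carrying (result, in_blockquote)
def format_blockquotes_py (content : String) : String :=
  let lines := (PySem.Chars.splitOn content.toList ['\n']).map String.ofList
  let st := lines.foldl (fun (acc : List String × Bool) line =>
    if PySem.Str.startswith line "> " then
      ((if acc.2 then acc.1 else acc.1 ++ ["<blockquote>"]) ++ [PySem.Str.slice line (some 2) none], true)
    else
      ((if acc.2 then acc.1 ++ ["</blockquote>"] else acc.1) ++ [line], false)) ([], false)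
  PySem.Str.join "\n" (if st.2 then st.1 ++ ["</blockquote>"] else st.1)

-- ===== PORT B =====
-- inner while loop of B: strips and collects the leading run of '> ' lines, returns (run, rest)
def bqRun : List String → List String × List String
  | [] => ([], [])
  | l :: ls =>
    if PySem.Str.startswith l "> " then
      let p := bqRun ls
      (PySem.Str.slice l (some 2) none :: p.1, p.2)
    else ([], l :: ls)

theorem bqRun_snd_length_le : ∀ ls : List String, (bqRun ls).2.length ≤ ls.length
  | [] => Nat.le_refl _
  | l :: ls => by
    simp only [bqRun]
    split
    · exact Nat.le_succ_of_le (bqRun_snd_length_le ls)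
    · exact Nat.le_refl _

-- outer while loop of B: emits each run, wrapping '> ' runs in blockquote tags
def bqLoop : List String → List String
  | [] => []
  | l :: ls =>
    if PySem.Str.startswith l "> " then
      "<blockquote>" :: PySem.Str.slice l (some 2) none ::
        ((bqRun ls).1 ++ "</blockquote>" :: bqLoop (bqRun ls).2)
    else l :: bqLoop ls
termination_by ls => ls.length
decreasing_by
  · exact Nat.lt_succ_of_le (bqRun_snd_length_le ls)
  · exact Nat.lt_succ_self _

def format_blockquotes_py_alt (content : String) : String :=
  PySem.Str.join "\n" (bqLoop ((PySem.Chars.splitOn content.toList ['\n']).map String.ofList))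

-- ===== PRECONDITION & SPEC =====
def Spec_format_blockquotes_py (content : String) (out : String) : Prop := out = format_blockquotes_py_alt content
instance (content : String) (out : String) : Decidable (Spec_format_blockquotes_py content out) := by unfold Spec_format_blockquotes_py; infer_instance

-- ===== CLAIM (what is proved, stated in full; the proofs are below) =====
def Claim_equal_format_blockquotes_py : Prop := ∀ (content : String), Dom_format_blockquotes_py content → Spec_format_blockquotes_py content (format_blockquotes_py content)

-- ===== LEMMAS AND PROOFS =====

-- A's loop written as a structural recursion on the lines with the flag as parameter
def bqArec : List String → Bool → List String
  | [], b => if b then ["</blockquote>"] else []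
  | l :: ls, b =>
    if PySem.Str.startswith l "> " then
      (if b then [] else ["<blockquote>"]) ++ PySem.Str.slice l (some 2) none :: bqArec ls true
    else
      (if b then ["</blockquote>"] else []) ++ l :: bqArec ls false

theorem bqFoldl_eq_arec (ls : List String) : ∀ (acc : List String) (b : Bool),
    (let st := ls.foldl (fun (acc : List String × Bool) line =>
      if PySem.Str.startswith line "> " then
        ((if acc.2 then acc.1 else acc.1 ++ ["<blockquote>"]) ++ [PySem.Str.slice line (some 2) none], true)
      else
        ((if acc.2 then acc.1 ++ ["</blockquote>"] else acc.1) ++ [line], false)) (acc, b)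
     if st.2 then st.1 ++ ["</blockquote>"] else st.1) = acc ++ bqArec ls b := by
  induction ls with
  | nil => intro acc b; cases b <;> simp [bqArec]
  | cons l ls ih =>
    intro acc b
    simp only [List.foldl_cons, bqArec]
    simp at ih
    by_cases h : PySem.Str.startswith l "> " <;>
      simp at h <;> cases b <;> simp [h, ih]

theorem bqArec_true_eq (ls : List String) :
    bqArec ls true = (bqRun ls).1 ++ "</blockquote>" :: bqArec (bqRun ls).2 false := by
  induction ls with
  | nil => simp [bqArec, bqRun]
  | cons l ls ih =>
    by_cases h : PySem.Str.startswith l "> " <;>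
      simp at h <;> simp [bqArec, bqRun, h, ih]

theorem bqArec_false_eq_bqLoop (ls : List String) : bqArec ls false = bqLoop ls := by
  induction ls using bqLoop.induct with
  | case1 => simp [bqArec, bqLoop]
  | case2 l ls h ih =>
    rw [bqLoop, if_pos h]
    simp at h
    rw [show bqArec (l :: ls) false
          = "<blockquote>" :: PySem.Str.slice l (some 2) none :: bqArec ls true from by
        simp [bqArec, h]]
    rw [bqArec_true_eq, ih]
  | case3 l ls h ih =>
    rw [bqLoop, if_neg h]
    simp at h
    simp [bqArec, h, ih]

-- ===== VERDICT (by name: the statement is the Claim_ definition above) =====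
theorem format_blockquotes_py_spec : Claim_equal_format_blockquotes_py := by
  intro content _
  unfold Spec_format_blockquotes_py format_blockquotes_py format_blockquotes_py_alt
  show PySem.Str.join "\n"
      (let st := ((PySem.Chars.splitOn content.toList ['\n']).map String.ofList).foldl
        (fun (acc : List String × Bool) line =>
          if PySem.Str.startswith line "> " then
            ((if acc.2 then acc.1 else acc.1 ++ ["<blockquote>"]) ++ [PySem.Str.slice line (some 2) none], true)
          else
            ((if acc.2 then acc.1 ++ ["</blockquote>"] else acc.1) ++ [line], false)) ([], false)
       if st.2 then st.1 ++ ["</blockquote>"] else st.1)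
    = PySem.Str.join "\n" (bqLoop ((PySem.Chars.splitOn content.toList ['\n']).map String.ofList))
  rw [bqFoldl_eq_arec, bqArec_false_eq_bqLoop, List.nil_append]
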